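-- pv_equiv track=rewrite | github.com/HALF111/cs61a | projects/proj02-cats/cats.py | shifty_shifts
-- ===== SOURCE A (Python) =====
-- def shifty_shifts(start, goal, limit):
--     """A diff function for autocorrect that determines how many letters
--     in START need to be substituted to create GOAL, then adds the difference in
--     their lengths.
--     """
--     # BEGIN PROBLEM 6
--     if limit < 0:
--         return 1
--
--     if len(start) == 0:
--         return len(goal)
--     elif len(goal) == 0:
--         return len(start)
--     else:
--         if start[0] == goal[0]:
--             return shifty_shifts(start[1:], goal[1:], limit)
--         else:
--             return shifty_shifts(start[1:], goal[1:], limit-1) + 1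
-- ===== SOURCE B (Python) =====
-- def shifty_shifts(start, goal, limit):
--     """Single index-free pass over the paired characters: count mismatches,
--     early-stop once the count exceeds limit, then add the length difference."""
--     if limit < 0:
--         return 1
--     m = 0
--     for a, b in zip(start, goal):
--         if a != b:
--             m += 1
--             if m > limit:
--                 return limit + 2
--     return m + abs(len(start) - len(goal))
-- ===== Notes on version B (the rewrite author's own statement) =====
-- stated objective: faster
-- what changed: Replaced the recursion that slices both strings at every step with a single iterative pass over zipped characters that counts mismatches, returns limit+2 as soon as the count exceeds the limit, and adds the length difference at the end.
import Mathlib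
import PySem

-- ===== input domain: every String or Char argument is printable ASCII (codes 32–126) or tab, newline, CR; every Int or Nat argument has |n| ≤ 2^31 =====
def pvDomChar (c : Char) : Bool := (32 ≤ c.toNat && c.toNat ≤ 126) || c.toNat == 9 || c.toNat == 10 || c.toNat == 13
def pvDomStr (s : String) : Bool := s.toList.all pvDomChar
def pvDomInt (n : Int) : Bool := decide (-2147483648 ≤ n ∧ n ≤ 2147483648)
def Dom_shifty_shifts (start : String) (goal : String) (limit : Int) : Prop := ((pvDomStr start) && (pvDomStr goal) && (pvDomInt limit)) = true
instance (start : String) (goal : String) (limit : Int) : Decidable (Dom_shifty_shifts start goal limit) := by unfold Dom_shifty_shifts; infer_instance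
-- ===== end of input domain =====

-- B replaces A's quadratic slicing recursion by one linear pass with an early stop (objective: faster, asymptotic).


-- ===== PORT A =====
-- A's recursion on the two strings' character lists (start[1:], goal[1:] = the tails).
def shiftyShiftsA : List Char → List Char → Int → Int
  | [], g, limit => if limit < 0 then 1 else (g.length : Int)
  | _ :: s, [], limit => if limit < 0 then 1 else ((s.length : Int) + 1)
  | a :: s, b :: g, limit =>
    if limit < 0 then 1
    else if a = b then shiftyShiftsA s g limit
    else shiftyShiftsA s g (limit - 1) + 1

def shifty_shifts (start : String) (goal : String) (limit : Int) : Int :=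
  shiftyShiftsA start.toList goal.toList limit

-- ===== PORT B =====
-- B's for-loop over zip(start, goal) carrying the mismatch count m;
-- `none` models the early `return limit + 2`, `some m` the loop running off the end.
def shiftyShiftsBLoop (limit : Int) : List Char → List Char → Int → Option Int
  | a :: s, b :: g, m =>
    if a ≠ b then
      if m + 1 > limit then none
      else shiftyShiftsBLoop limit s g (m + 1)
    else shiftyShiftsBLoop limit s g m
  | _, _, m => some m

def shifty_shifts_alt (start : String) (goal : String) (limit : Int) : Int :=
  if limit < 0 then 1
  else match shiftyShiftsBLoop limit start.toList goal.toList 0 with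
    | none => limit + 2
    | some m => m + |(start.toList.length : Int) - (goal.toList.length : Int)|

-- ===== PRECONDITION & SPEC =====
def Spec_shifty_shifts (start : String) (goal : String) (limit : Int) (out : Int) : Prop := out = shifty_shifts_alt start goal limit
instance (start : String) (goal : String) (limit : Int) (out : Int) : Decidable (Spec_shifty_shifts start goal limit out) := by unfold Spec_shifty_shifts; infer_instance

-- ===== CLAIM (what is proved, stated in full; the proofs are below) =====
def Claim_equal_shifty_shifts : Prop := ∀ (start : String) (goal : String) (limit : Int), Dom_shifty_shifts start goal limit → Spec_shifty_shifts start goal limit (shifty_shifts start goal limit)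

-- ===== LEMMAS AND PROOFS =====
theorem pv_abs_natCast_sub_zero (n : Nat) : |(0 : Int) - (n : Int)| = (n : Int) := by
  rw [zero_sub, abs_neg, Int.abs_natCast]

theorem pv_abs_succ_sub_succ (p q : Nat) :
    |((p : Int) + 1) - ((q : Int) + 1)| = |(p : Int) - (q : Int)| := by congr 1; ring

-- Invariant: after m mismatches, A's remaining recursion with budget limit - m
-- equals B's loop continuation (early exit ⇒ value limit + 2 - m locally).
theorem shiftyA_eq_loop (s : List Char) : ∀ (g : List Char) (limit m : Int), m ≤ limit →
    shiftyShiftsA s g (limit - m) =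
      (match shiftyShiftsBLoop limit s g m with
        | none => limit + 2 - m
        | some m' => (m' - m) + |(s.length : Int) - (g.length : Int)|) := by
  induction s with
  | nil =>
    intro g limit m h
    simp only [shiftyShiftsA, shiftyShiftsBLoop, if_neg (show ¬(limit - m < 0) by omega),
      List.length_nil, Nat.cast_zero, pv_abs_natCast_sub_zero]
    cases g <;> simp <;> omega
  | cons a s ih =>
    intro g limit m h
    cases g with
    | nil =>
      simp only [shiftyShiftsA, shiftyShiftsBLoop, if_neg (show ¬(limit - m < 0) by omega),
        List.length_nil, List.length_cons, Nat.cast_zero]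
      rw [sub_zero, abs_of_nonneg (by positivity)]
      push_cast
      ring
    | cons b g =>
      by_cases hab : a = b
      · subst hab
        have ih' := ih g limit m h
        simp only [shiftyShiftsA, shiftyShiftsBLoop, if_neg (show ¬(limit - m < 0) by omega),
          ne_eq, not_true_eq_false, if_false, List.length_cons]
        rw [ih']
        cases hres : shiftyShiftsBLoop limit s g m with
        | none => simp
        | some m' =>
          simp only
          push_cast
          rw [pv_abs_succ_sub_succ]
      · by_cases hex : m + 1 > limit
        · have hA1 : shiftyShiftsA s g (limit - m - 1) = 1 := by
            cases s <;> cases g <;>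
              simp only [shiftyShiftsA, if_pos (show limit - m - 1 < 0 by omega)]
          simp only [shiftyShiftsA, shiftyShiftsBLoop,
            if_neg (show ¬(limit - m < 0) by omega), ne_eq, hab,
            not_false_eq_true, if_true, if_pos hex]
          rw [if_neg not_false, hA1]
          show (1 : Int) + 1 = limit + 2 - m
          omega
        · have ih' := ih g limit (m + 1) (by omega)
          simp only [shiftyShiftsA, shiftyShiftsBLoop,
            if_neg (show ¬(limit - m < 0) by omega), ne_eq, hab,
            not_false_eq_true, if_true, if_neg hex, List.length_cons]
          rw [show limit - m - 1 = limit - (m + 1) by ring, ih']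
          cases hres : shiftyShiftsBLoop limit s g (m + 1) with
          | none => show limit + 2 - (m + 1) + 1 = limit + 2 - m; ring
          | some m' =>
            simp only
            push_cast
            rw [pv_abs_succ_sub_succ]
            ring

-- ===== VERDICT (by name: the statement is the Claim_ definition above) =====
theorem shifty_shifts_spec : Claim_equal_shifty_shifts := by
  intro start goal limit _
  unfold Spec_shifty_shifts shifty_shifts shifty_shifts_alt
  by_cases hl : limit < 0
  · rw [if_pos hl]
    cases start.toList <;> cases goal.toList <;>
      simp only [shiftyShiftsA, if_pos hl]
  · have hmain := shiftyA_eq_loop start.toList goal.toList limit 0 (by omega)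
    rw [sub_zero] at hmain
    rw [hmain, if_neg hl]
    cases hres : shiftyShiftsBLoop limit start.toList goal.toList 0 with
    | none => simp
    | some m' => simp
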